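-- pv_equiv track=rewrite | github.com/luised94/explorations | sm2/sm2.py | apply_throttle_and_cap
-- ===== SOURCE A (Python) =====
-- from typing import TypeAlias
--
-- DueItem: TypeAlias = tuple[str, int, int]
--
-- def apply_throttle_and_cap(
--     due_queue: list[DueItem],
--     today_new_by_domain: dict[str, int],
--     total_new_max: int,
--     min_per_domain: int,
--     max_reviews: int,
--     blocked_set: set[str],
-- ) -> list[str]:
--     # pass 1: reserve floor items per domain
--     reserved_item_ids: set[str] = set()
--     reserved_count_by_domain: dict[str, int] = {}
--     for due_item in due_queue:
--         item_id: str = due_item[0]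
--         repetition_count: int = due_item[1]
--         if item_id in blocked_set:
--             continue
--         if repetition_count == 0:
--             identifier_parts: list[str] = item_id.split("-")
--             domain: str = identifier_parts[0]
--             already_reviewed_in_domain: int = today_new_by_domain.get(domain, 0)
--             already_reserved_in_domain: int = reserved_count_by_domain.get(domain, 0)
--             floor_remaining: int = (
--                 min_per_domain - already_reviewed_in_domain - already_reserved_in_domain
--             )
--             if floor_remaining > 0:
--                 reserved_item_ids.add(item_id)
--                 reserved_count_by_domain[domain] = already_reserved_in_domain + 1
--     # pass 2: build result - reserved slots pre-allocated from budget
--     already_new_today: int = 0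
--     for domain_count in today_new_by_domain.values():
--         already_new_today = already_new_today + domain_count
--     total_reserved: int = len(reserved_item_ids)
--     non_reserved_budget: int = max(0, total_new_max - total_reserved - already_new_today)
--     non_reserved_added: int = 0
--     result: list[str] = []
--     for due_item in due_queue:
--         item_id: str = due_item[0]
--         repetition_count: int = due_item[1]
--         if item_id in blocked_set:
--             continue
--         if repetition_count > 0:
--             result.append(item_id)
--         else:
--             if item_id in reserved_item_ids:
--                 result.append(item_id)
--             elif non_reserved_added < non_reserved_budget:
--                 result.append(item_id)
--                 non_reserved_added = non_reserved_added + 1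
--     if len(result) > max_reviews:
--         result = result[:max_reviews]
--     return result
-- ===== SOURCE B (Python) =====
-- def apply_throttle_and_cap(
--     due_queue,
--     today_new_by_domain,
--     total_new_max,
--     min_per_domain,
--     max_reviews,
--     blocked_set,
-- ):
--     # Index-set reconstruction: instead of streaming counters, group the new
--     # items' queue positions by domain, slice each group's prefix as the
--     # reserved slots, pick the extras as a slice of the remaining new
--     # positions, and select by index membership in one final comprehension.
--     visible = [(i, item[0], item[1]) for i, item in enumerate(due_queue)
--                if item[0] not in blocked_set]
--     new_pairs = [(item_id.split("-")[0], i) for i, item_id, rep in visible if rep == 0]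
--     new_by_domain = {}
--     for domain, i in new_pairs:
--         new_by_domain.setdefault(domain, []).append(i)
--     reserved = []
--     for domain, idxs in new_by_domain.items():
--         reserved.extend(idxs[: max(0, min_per_domain - today_new_by_domain.get(domain, 0))])
--     budget = max(0, total_new_max - len(reserved) - sum(today_new_by_domain.values()))
--     reserved_set = set(reserved)
--     extras = [i for i, _id, rep in visible if rep <= 0 and i not in reserved_set][:budget]
--     chosen = reserved_set | set(extras)
--     result = [item_id for i, item_id, rep in visible if rep > 0 or i in chosen]
--     return result[:max_reviews]
-- ===== Notes on version B (the rewrite author's own statement) =====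
-- stated objective: alternative
-- what changed: A streams the queue twice with mutable per-domain counters and a growing reserved-id set; B instead reconstructs the selection as index sets: it groups the queue positions of new items by domain, takes each group's prefix slice as the reserved slots, takes a slice of the remaining new positions as the budgeted extras, and then emits the result in one comprehension by index membership - no running reservation or budget counter exists in B.
import Mathlib
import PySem

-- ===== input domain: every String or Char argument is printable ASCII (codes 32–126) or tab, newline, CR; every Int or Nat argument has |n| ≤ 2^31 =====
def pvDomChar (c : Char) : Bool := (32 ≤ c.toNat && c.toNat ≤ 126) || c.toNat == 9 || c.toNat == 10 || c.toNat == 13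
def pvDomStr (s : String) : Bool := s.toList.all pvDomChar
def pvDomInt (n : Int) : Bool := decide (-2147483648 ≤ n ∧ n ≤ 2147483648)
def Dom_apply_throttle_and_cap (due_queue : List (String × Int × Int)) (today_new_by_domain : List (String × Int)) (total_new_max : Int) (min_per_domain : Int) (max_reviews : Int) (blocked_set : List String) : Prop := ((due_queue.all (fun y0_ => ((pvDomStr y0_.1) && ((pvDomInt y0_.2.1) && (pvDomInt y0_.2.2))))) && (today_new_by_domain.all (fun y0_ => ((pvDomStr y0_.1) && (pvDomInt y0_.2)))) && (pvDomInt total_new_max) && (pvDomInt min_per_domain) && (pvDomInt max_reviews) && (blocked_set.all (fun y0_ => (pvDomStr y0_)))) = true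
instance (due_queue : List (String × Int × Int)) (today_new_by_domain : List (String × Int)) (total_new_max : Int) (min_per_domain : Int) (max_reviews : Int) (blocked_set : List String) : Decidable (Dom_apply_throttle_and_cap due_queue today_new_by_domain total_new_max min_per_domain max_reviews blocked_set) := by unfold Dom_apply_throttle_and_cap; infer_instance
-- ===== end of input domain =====

-- B replaces A's streaming counters by an index-set reconstruction: it groups the queue positions
-- of new items by domain, slices each group's prefix as the reserved slots, slices the remaining
-- new positions as the budgeted extras, and selects by index membership (objective: alternative).

-- item_id.split("-")[0]  (split("-") on a nonempty separator never raises and never returns [])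
def pvItemDomain (s : String) : String :=
  PySem.List.pyGetD ((PySem.Str.split? s "-").getD []) 0 ""

-- ===== PORT A =====
-- body of A's pass-1 loop (reserve floor items per domain)
def pvA1step (blocked_set : List String) (td : PySem.Dict String Int) (min_per_domain : Int)
    (st : PySem.Set String × PySem.Dict String Int) (due_item : String × Int × Int) :
    PySem.Set String × PySem.Dict String Int :=
  let item_id := due_item.1
  let repetition_count := due_item.2.1
  if item_id ∈ blocked_set then st
  else if repetition_count = 0 then
    let domain := pvItemDomain item_id
    let already_reviewed_in_domain := td.getD domain 0
    let already_reserved_in_domain := st.2.getD domain 0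
    let floor_remaining := min_per_domain - already_reviewed_in_domain - already_reserved_in_domain
    if floor_remaining > 0 then
      (PySem.Set.add st.1 item_id, st.2.insert domain (already_reserved_in_domain + 1))
    else st
  else st

-- body of A's pass-2 loop (build result; reserved slots pre-allocated from budget)
def pvA2step (blocked_set : List String) (reserved : PySem.Set String) (budget : Int)
    (st : Int × List String) (due_item : String × Int × Int) : Int × List String :=
  let item_id := due_item.1
  let repetition_count := due_item.2.1
  if item_id ∈ blocked_set then st
  else if repetition_count > 0 then (st.1, st.2 ++ [item_id])
  else if PySem.Set.contains reserved item_id then (st.1, st.2 ++ [item_id])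
  else if st.1 < budget then (st.1 + 1, st.2 ++ [item_id])
  else st

def apply_throttle_and_cap (due_queue : List (String × Int × Int)) (today_new_by_domain : List (String × Int)) (total_new_max : Int) (min_per_domain : Int) (max_reviews : Int) (blocked_set : List String) : List String :=
  let td : PySem.Dict String Int := PySem.Dict.mk today_new_by_domain
  let p1 := due_queue.foldl (pvA1step blocked_set td min_per_domain) (PySem.Set.empty, PySem.Dict.empty)
  let reserved_item_ids := p1.1
  let already_new_today := (PySem.Dict.values td).foldl (fun acc v => acc + v) 0
  let total_reserved : Int := PySem.Set.len reserved_item_ids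
  let non_reserved_budget := max 0 (total_new_max - total_reserved - already_new_today)
  let p2 := due_queue.foldl (pvA2step blocked_set reserved_item_ids non_reserved_budget) (0, [])
  let result := p2.2
  if (result.length : Int) > max_reviews then PySem.List.slice result none (some max_reviews)
  else result

-- ===== PORT B =====
def apply_throttle_and_cap_alt (due_queue : List (String × Int × Int)) (today_new_by_domain : List (String × Int)) (total_new_max : Int) (min_per_domain : Int) (max_reviews : Int) (blocked_set : List String) : List String :=
  let td : PySem.Dict String Int := PySem.Dict.mk today_new_by_domain
  -- visible = [(i, item[0], item[1]) for i, item in enumerate(due_queue) if item[0] not in blocked_set]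
  let visible : List (Int × String × Int) :=
    ((PySem.List.enumerate due_queue).filter (fun p => !decide (p.2.1 ∈ blocked_set))).map
      (fun p => (p.1, p.2.1, p.2.2.1))
  -- new_pairs = [(item_id.split("-")[0], i) for i, item_id, rep in visible if rep == 0]
  let new_pairs : List (String × Int) :=
    (visible.filter (fun v => v.2.2 == 0)).map (fun v => (pvItemDomain v.2.1, v.1))
  -- group the queue positions of new items by domain (setdefault(...).append(i))
  let new_by_domain : PySem.Dict String (List Int) :=
    new_pairs.foldl (fun d p => d.modify p.1 [] (fun l => l ++ [p.2])) PySem.Dict.empty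
  -- reserved slots: each domain group's prefix slice
  let reserved : List Int :=
    (PySem.Dict.items new_by_domain).foldl
      (fun acc kv => acc ++ PySem.List.slice kv.2 none
        (some (max 0 (min_per_domain - td.getD kv.1 0)))) []
  let budget : Int := max 0 (total_new_max - (reserved.length : Int) - (PySem.Dict.values td).sum)
  let reserved_set : PySem.Set Int := PySem.Set.ofList reserved
  -- extras = the first `budget` remaining new positions
  let extras : List Int :=
    PySem.List.slice ((visible.filter (fun v => decide (v.2.2 ≤ 0) &&
      !PySem.Set.contains reserved_set v.1)).map (fun v => v.1)) none (some budget)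
  let chosen : PySem.Set Int := PySem.Set.union reserved_set (PySem.Set.ofList extras)
  let result : List String :=
    (visible.filter (fun v => decide (v.2.2 > 0) || PySem.Set.contains chosen v.1)).map
      (fun v => v.2.1)
  PySem.List.slice result none (some max_reviews)

-- ===== PRECONDITION & SPEC =====
-- Pre_ excludes queues in which two non-blocked new items (repetition_count ≤ 0) share an item id:
-- there A's reservation accidentally keys on the id via set membership (a duplicate-id corner no
-- caller specifies), while B's position-based reservation treats each occurrence as its own item.
def Pre_apply_throttle_and_cap (due_queue : List (String × Int × Int)) (today_new_by_domain : List (String × Int)) (total_new_max : Int) (min_per_domain : Int) (max_reviews : Int) (blocked_set : List String) : Prop :=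
  ((due_queue.filter (fun it => !decide (it.1 ∈ blocked_set) && decide (it.2.1 ≤ 0))).map (fun it => it.1)).Nodup
instance (due_queue : List (String × Int × Int)) (today_new_by_domain : List (String × Int)) (total_new_max : Int) (min_per_domain : Int) (max_reviews : Int) (blocked_set : List String) : Decidable (Pre_apply_throttle_and_cap due_queue today_new_by_domain total_new_max min_per_domain max_reviews blocked_set) := by unfold Pre_apply_throttle_and_cap; infer_instance

def pvWitness_apply_throttle_and_cap : (List (String × Int × Int)) × (List (String × Int)) × Int × Int × Int × List String :=
  ([("math-1", 0, 0), ("bio-2", 1, 0), ("math-3", 0, 0)], [("math", 1)], 2, 1, 10, ["bio-9"])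

def Spec_apply_throttle_and_cap (due_queue : List (String × Int × Int)) (today_new_by_domain : List (String × Int)) (total_new_max : Int) (min_per_domain : Int) (max_reviews : Int) (blocked_set : List String) (out : List String) : Prop := out = apply_throttle_and_cap_alt due_queue today_new_by_domain total_new_max min_per_domain max_reviews blocked_set
instance (due_queue : List (String × Int × Int)) (today_new_by_domain : List (String × Int)) (total_new_max : Int) (min_per_domain : Int) (max_reviews : Int) (blocked_set : List String) (out : List String) : Decidable (Spec_apply_throttle_and_cap due_queue today_new_by_domain total_new_max min_per_domain max_reviews blocked_set out) := by unfold Spec_apply_throttle_and_cap; infer_instance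

-- ===== CLAIM (what is proved, stated in full; the proofs are below) =====
def Claim_equal_apply_throttle_and_cap : Prop := ∀ (due_queue : List (String × Int × Int)) (today_new_by_domain : List (String × Int)) (total_new_max : Int) (min_per_domain : Int) (max_reviews : Int) (blocked_set : List String), Dom_apply_throttle_and_cap due_queue today_new_by_domain total_new_max min_per_domain max_reviews blocked_set → Pre_apply_throttle_and_cap due_queue today_new_by_domain total_new_max min_per_domain max_reviews blocked_set → Spec_apply_throttle_and_cap due_queue today_new_by_domain total_new_max min_per_domain max_reviews blocked_set (apply_throttle_and_cap due_queue today_new_by_domain total_new_max min_per_domain max_reviews blocked_set)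

-- ===== LEMMAS AND PROOFS =====

-- eligibility: non-blocked and new
def pvElig (bl : List String) (it : String × Int × Int) : Bool :=
  !decide (it.1 ∈ bl) && decide (it.2.1 = 0)

-- specification of A's pass 1: the reserved ids, selected in order with a per-domain counter sd
def pvSel (bl : List String) (tg : String → Int) :
    List (String × Int × Int) → PySem.Dict String Int → List String
  | [], _ => []
  | it :: l, sd =>
    if it.1 ∈ bl then pvSel bl tg l sd
    else if it.2.1 = 0 then
      let d := pvItemDomain it.1
      let s := sd.getD d 0
      if s < tg d then it.1 :: pvSel bl tg l (sd.insert d (s + 1))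
      else pvSel bl tg l (sd.insert d (s + 1))
    else pvSel bl tg l sd

-- the per-domain counter after a prefix
def pvSeen (bl : List String) : List (String × Int × Int) → PySem.Dict String Int → PySem.Dict String Int
  | [], sd => sd
  | it :: l, sd =>
    if pvElig bl it then
      pvSeen bl l (sd.insert (pvItemDomain it.1) (sd.getD (pvItemDomain it.1) 0 + 1))
    else pvSeen bl l sd

-- B's pipeline, named for the proofs (definitionally the port's own let-chain)
def pvVisF (bl : List String) (dq : List (String × Int × Int)) (s : Int) : List (Int × String × Int) :=
  ((PySem.List.enumerate dq s).filter (fun p => !decide (p.2.1 ∈ bl))).map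
    (fun p => (p.1, p.2.1, p.2.2.1))

def pvGrp (bl : List String) (dq : List (String × Int × Int)) : PySem.Dict String (List Int) :=
  (((pvVisF bl dq 0).filter (fun v => v.2.2 == 0)).map (fun v => (pvItemDomain v.2.1, v.1))).foldl
    (fun d p => d.modify p.1 [] (fun l => l ++ [p.2])) PySem.Dict.empty

def pvRes (bl : List String) (td : PySem.Dict String Int) (mpd : Int)
    (dq : List (String × Int × Int)) : List Int :=
  (PySem.Dict.items (pvGrp bl dq)).foldl
    (fun acc kv => acc ++ PySem.List.slice kv.2 none (some (max 0 (mpd - td.getD kv.1 0)))) []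

def pvExtras (bl : List String) (td : PySem.Dict String Int) (mpd : Int) (budget : Int)
    (dq : List (String × Int × Int)) : List Int :=
  PySem.List.slice (((pvVisF bl dq 0).filter (fun v => decide (v.2.2 ≤ 0) &&
    !PySem.Set.contains (PySem.Set.ofList (pvRes bl td mpd dq)) v.1)).map (fun v => v.1))
    none (some budget)

-- the per-domain eligible count over a prefix
def pvCnt (bl : List String) (d : String) (P : List (String × Int × Int)) : Nat :=
  ((P.filter (pvElig bl)).filter (fun it => pvItemDomain it.1 == d)).length

-- the non-reserved new count over a prefix (B's extras rank / A's budget counter)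
def pvNR (bl : List String) (R : List Int) (P : List (String × Int × Int)) (s : Int) : Nat :=
  ((pvVisF bl P s).filter (fun v => decide (v.2.2 ≤ 0) &&
    !PySem.Set.contains (PySem.Set.ofList R) v.1)).length

theorem pvSel_append (bl : List String) (tg : String → Int) (p l : List (String × Int × Int))
    (sd : PySem.Dict String Int) :
    pvSel bl tg (p ++ l) sd = pvSel bl tg p sd ++ pvSel bl tg l (pvSeen bl p sd) := by
  induction p generalizing sd with
  | nil => simp [pvSel, pvSeen]
  | cons it p ih =>
    by_cases hb : it.1 ∈ bl
    · simp [pvSel, pvSeen, pvElig, hb, ih]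
    · by_cases hr : it.2.1 = 0
      · have he : pvElig bl it = true := by simp [pvElig, hb, hr]
        simp only [List.cons_append, pvSel, if_neg hb, if_pos hr, pvSeen, he, if_true]
        split <;> simp [ih]
      · simp [pvSel, pvSeen, pvElig, hb, hr, ih]

theorem pvSel_sublist (bl : List String) (tg : String → Int) :
    ∀ (l : List (String × Int × Int)) (sd : PySem.Dict String Int),
    List.Sublist (pvSel bl tg l sd) ((l.filter (pvElig bl)).map (fun it => it.1)) := by
  intro l
  induction l with
  | nil => simp [pvSel]
  | cons it l ih =>
    intro sd
    by_cases hb : it.1 ∈ bl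
    · have he : pvElig bl it = false := by simp [pvElig, hb]
      simpa [pvSel, hb, List.filter_cons, he] using ih sd
    · by_cases hr : it.2.1 = 0
      · have he : pvElig bl it = true := by simp [pvElig, hb, hr]
        simp only [pvSel, if_neg hb, if_pos hr, List.filter_cons, he, if_true, List.map_cons]
        split
        · exact List.Sublist.cons₂ _ (ih _)
        · exact List.Sublist.cons _ (ih _)
      · have he : pvElig bl it = false := by simp [pvElig, hr]
        simpa [pvSel, hb, hr, List.filter_cons, he] using ih sd

-- A's pass-1 fold computes exactly the pvSel selection (added to the set in order)
theorem pass1_eq_pvSel (bl : List String) (td : PySem.Dict String Int) (mpd : Int)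
    (l : List (String × Int × Int)) (S : PySem.Set String)
    (cd sd : PySem.Dict String Int)
    (h0 : ∀ d, 0 ≤ sd.getD d 0)
    (h1 : ∀ d, cd.getD d 0 = min (sd.getD d 0) (max (mpd - td.getD d 0) 0)) :
    (l.foldl (pvA1step bl td mpd) (S, cd)).1
      = (pvSel bl (fun d => mpd - td.getD d 0) l sd).foldl PySem.Set.add S := by
  induction l generalizing S cd sd with
  | nil => simp [pvSel]
  | cons it l ih =>
    simp only [List.foldl_cons, pvSel]
    by_cases hb : it.1 ∈ bl
    · rw [if_pos hb]
      have hstep : pvA1step bl td mpd (S, cd) it = (S, cd) := by simp [pvA1step, hb]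
      rw [hstep]; exact ih S cd sd h0 h1
    · rw [if_neg hb]
      by_cases hr : it.2.1 = 0
      · rw [if_pos hr]
        have hs := h0 (pvItemDomain it.1)
        have hc := h1 (pvItemDomain it.1)
        by_cases hlt : sd.getD (pvItemDomain it.1) 0 < mpd - td.getD (pvItemDomain it.1) 0
        · rw [if_pos hlt]
          have hstep : pvA1step bl td mpd (S, cd) it
              = (PySem.Set.add S it.1,
                 cd.insert (pvItemDomain it.1) (cd.getD (pvItemDomain it.1) 0 + 1)) := by
            simp only [pvA1step, if_neg hb, if_pos hr]
            rw [if_pos (by omega)]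
          rw [hstep, List.foldl_cons]
          refine ih _ _ _ (fun d' => ?_) (fun d' => ?_)
          · by_cases hd : d' = pvItemDomain it.1
            · rw [hd, PySem.Dict.getD_insert_self]; omega
            · rw [PySem.Dict.getD_insert_of_ne _ _ _ hd]; exact h0 d'
          · by_cases hd : d' = pvItemDomain it.1
            · rw [hd, PySem.Dict.getD_insert_self, PySem.Dict.getD_insert_self]; omega
            · rw [PySem.Dict.getD_insert_of_ne _ _ _ hd, PySem.Dict.getD_insert_of_ne _ _ _ hd]
              exact h1 d'
        · rw [if_neg hlt]
          have hstep : pvA1step bl td mpd (S, cd) it = (S, cd) := by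
            simp only [pvA1step, if_neg hb, if_pos hr]
            rw [if_neg (by omega)]
          rw [hstep]
          refine ih _ _ _ (fun d' => ?_) (fun d' => ?_)
          · by_cases hd : d' = pvItemDomain it.1
            · rw [hd, PySem.Dict.getD_insert_self]; omega
            · rw [PySem.Dict.getD_insert_of_ne _ _ _ hd]; exact h0 d'
          · by_cases hd : d' = pvItemDomain it.1
            · rw [hd, PySem.Dict.getD_insert_self]
              have := h1 d'
              rw [hd] at this
              omega
            · rw [PySem.Dict.getD_insert_of_ne _ _ _ hd]; exact h1 d'
      · rw [if_neg hr]
        have hstep : pvA1step bl td mpd (S, cd) it = (S, cd) := by simp [pvA1step, hb, hr]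
        rw [hstep]; exact ih S cd sd h0 h1

-- per-domain length of the selection
theorem countP_pvSel (bl : List String) (td : PySem.Dict String Int) (mpd : Int)
    (l : List (String × Int × Int)) (sd : PySem.Dict String Int) (d : String)
    (h0 : ∀ d', 0 ≤ sd.getD d' 0) :
    ((pvSel bl (fun x => mpd - td.getD x 0) l sd).countP (fun y => decide (pvItemDomain y = d)) : Int)
      = min (max (mpd - td.getD d 0) 0)
            (sd.getD d 0 + (((l.filter (pvElig bl)).map (fun it => pvItemDomain it.1)).count d : Int))
        - min (max (mpd - td.getD d 0) 0) (sd.getD d 0) := by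
  induction l generalizing sd with
  | nil => simp [pvSel]
  | cons it l ih =>
    by_cases hb : it.1 ∈ bl
    · have he : pvElig bl it = false := by simp [pvElig, hb]
      simp only [pvSel, if_pos hb, List.filter_cons, he, Bool.false_eq_true, if_false]
      exact ih _ h0
    · by_cases hr : it.2.1 = 0
      · have he : pvElig bl it = true := by simp [pvElig, hb, hr]
        simp only [pvSel, if_neg hb, if_pos hr, List.filter_cons, he, if_true, List.map_cons]
        have h0' : ∀ d', 0 ≤ (sd.insert (pvItemDomain it.1) (sd.getD (pvItemDomain it.1) 0 + 1)).getD d' 0 := by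
          intro d'
          by_cases hd' : d' = pvItemDomain it.1
          · rw [hd', PySem.Dict.getD_insert_self]; have := h0 (pvItemDomain it.1); omega
          · rw [PySem.Dict.getD_insert_of_ne _ _ _ hd']; exact h0 d'
        have hih := ih (sd.insert (pvItemDomain it.1) (sd.getD (pvItemDomain it.1) 0 + 1)) h0'
        by_cases hd : pvItemDomain it.1 = d
        · subst hd
          rw [PySem.Dict.getD_insert_self] at hih
          have hs := h0 (pvItemDomain it.1)
          split_ifs with hlt
          · simp only [List.countP_cons, List.count_cons]
            simp only [decide_eq_true_eq, beq_self_eq_true, if_true]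
            push_cast at hih ⊢
            omega
          · simp only [List.count_cons, beq_self_eq_true, if_true]
            push_cast at hih ⊢
            omega
        · have hne : d ≠ pvItemDomain it.1 := fun h => hd h.symm
          rw [PySem.Dict.getD_insert_of_ne _ _ _ hne] at hih
          split_ifs with hlt
          · simp only [List.countP_cons, List.count_cons]
            simp only [decide_eq_true_eq, hd, if_false, beq_iff_eq, Ne.symm hne]
            push_cast at hih ⊢
            omega
          · simp only [List.count_cons, beq_iff_eq, Ne.symm hne]
            push_cast at hih ⊢
            omega
      · have he : pvElig bl it = false := by simp [pvElig, hr]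
        simp only [pvSel, if_neg hb, if_neg hr, List.filter_cons, he, Bool.false_eq_true, if_false]
        exact ih _ h0

-- a list whose keys all lie in a nodup list D has length = sum over D of per-key counts
theorem length_eq_sum_countP (key : String → String) :
    ∀ (D : List String) (xs : List String), D.Nodup → (∀ y ∈ xs, key y ∈ D) →
    (xs.length : Int) = (D.map (fun d => (xs.countP (fun y => decide (key y = d)) : Int))).sum := by
  intro D
  induction D with
  | nil =>
    intro xs _ hk
    cases xs with
    | nil => simp
    | cons a t => exact absurd (hk a (by simp)) (by simp)
  | cons d D ih =>
    intro xs hnd hk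
    have hsplit := @List.length_eq_length_filter_add _ xs (fun y => decide (key y = d))
    have hxs' : ∀ y ∈ xs.filter (fun y => !decide (key y = d)), key y ∈ D := by
      intro y hy
      have hm := List.mem_filter.1 hy
      have := hk y hm.1
      simp only [List.mem_cons] at this
      rcases this with h | h
      · exfalso; simp [h] at hm
      · exact h
    have hih := ih (xs.filter (fun y => !decide (key y = d))) hnd.of_cons hxs'
    have hcnt : ∀ d' ∈ D, (xs.filter (fun y => !decide (key y = d))).countP
        (fun y => decide (key y = d')) = xs.countP (fun y => decide (key y = d')) := by
      intro d' hd'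
      have hne : d' ≠ d := by rintro rfl; exact (List.nodup_cons.1 hnd).1 hd'
      rw [List.countP_filter]
      refine List.countP_congr (fun a _ => ?_)
      simp only [Bool.and_eq_true, decide_eq_true_eq, Bool.not_eq_true', decide_eq_false_iff_not]
      constructor
      · exact fun h => h.1
      · exact fun h => ⟨h, fun he => hne (h.symm.trans he)⟩
    have hmap : (D.map (fun d' => ((xs.filter (fun y => !decide (key y = d))).countP
          (fun y => decide (key y = d')) : Int)))
        = D.map (fun d' => (xs.countP (fun y => decide (key y = d')) : Int)) := by
      refine List.map_congr_left (fun d' hd' => ?_)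
      rw [hcnt d' hd']
    rw [hmap] at hih
    simp only [List.map_cons, List.sum_cons]
    rw [← hih, List.countP_eq_length_filter]
    push_cast
    omega

theorem foldl_set_add_of_disjoint {α : Type} [BEq α] [LawfulBEq α] :
    ∀ (xs : List α) (S : PySem.Set α), xs.Nodup → (∀ x ∈ xs, x ∉ S) →
    xs.foldl PySem.Set.add S = S ++ xs := by
  intro xs
  induction xs with
  | nil => simp
  | cons x t ih =>
    intro S hnd hdis
    simp only [List.foldl_cons]
    rw [PySem.Set.add_of_not_mem (hdis x (by simp))]
    rw [ih _ hnd.of_cons (fun y hy => ?_), List.append_assoc]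
    · simp
    · intro hmem
      rcases List.mem_append.1 hmem with h | h
      · exact hdis y (by simp [hy]) h
      · simp only [List.mem_singleton] at h
        exact (List.nodup_cons.1 hnd).1 (h ▸ hy)

theorem nodup_ofList_eq_self {α : Type} [BEq α] [LawfulBEq α] (xs : List α) (h : xs.Nodup) :
    PySem.Set.ofList xs = xs := by
  rw [PySem.Set.ofList_eq_foldl, foldl_set_add_of_disjoint xs [] h (by simp)]
  simp

-- ===== structure of B's pipeline =====

theorem pvVisF_append (bl : List String) (P L : List (String × Int × Int)) (s : Int) :
    pvVisF bl (P ++ L) s = pvVisF bl P s ++ pvVisF bl L (s + P.length) := by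
  simp [pvVisF, PySem.List.enumerate_append, List.filter_append]

theorem pvVisF_cons (bl : List String) (x : String × Int × Int) (L : List (String × Int × Int))
    (s : Int) :
    pvVisF bl (x :: L) s
      = (if x.1 ∈ bl then [] else [(s, x.1, x.2.1)]) ++ pvVisF bl L (s + 1) := by
  by_cases hb : x.1 ∈ bl <;> simp [pvVisF, PySem.List.enumerate_cons, List.filter_cons, hb]

theorem pvVisF_fst_bounds (bl : List String) :
    ∀ (P : List (String × Int × Int)) (s : Int) (v : Int × String × Int),
    v ∈ pvVisF bl P s → s ≤ v.1 ∧ v.1 < s + P.length := by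
  intro P
  induction P with
  | nil => intro s v hv; simp [pvVisF] at hv
  | cons x L ih =>
    intro s v hv
    rw [pvVisF_cons] at hv
    rcases List.mem_append.1 hv with h | h
    · have hx : v = (s, x.1, x.2.1) := by
        split at h
        · simp at h
        · simpa using h
      subst hx
      simp only [List.length_cons]
      constructor
      · exact le_refl _
      · push_cast; omega
    · have := ih (s + 1) v h
      simp only [List.length_cons]
      push_cast
      omega

-- the group of domain k is the list of positions of its eligible new items
theorem pairs_filter_map (k : String) :
    ∀ (l : List (Int × String × Int)),
    ((l.map (fun v => (pvItemDomain v.2.1, v.1))).filter (fun p => p.1 == k)).map (fun p => p.2)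
      = (l.filter (fun v => pvItemDomain v.2.1 == k)).map (fun v => v.1) := by
  intro l
  induction l with
  | nil => simp
  | cons v l ih =>
    by_cases hk : pvItemDomain v.2.1 == k
    · simp only [List.map_cons, List.filter_cons, hk, if_true]
      simpa [hk] using congrArg (List.cons v.1) ih
    · simp only [List.map_cons, List.filter_cons]
      simpa [hk] using ih

theorem pvGrp_getD (bl : List String) (dq : List (String × Int × Int)) (k : String) :
    (pvGrp bl dq).getD k []
      = ((pvVisF bl dq 0).filter (fun v => v.2.2 == 0 && (pvItemDomain v.2.1 == k))).map
          (fun v => v.1) := by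
  unfold pvGrp
  rw [PySem.Dict.getD_foldl_modify_append, PySem.Dict.getD_empty, List.nil_append,
    pairs_filter_map k, List.filter_filter]
  exact congrArg _ (List.filter_congr (fun v _ => Bool.and_comm _ _))

theorem pvGrp_keys (bl : List String) (dq : List (String × Int × Int)) :
    (pvGrp bl dq).keys
      = PySem.Set.ofList (((pvVisF bl dq 0).filter (fun v => v.2.2 == 0)).map
          (fun v => pvItemDomain v.2.1)) := by
  unfold pvGrp
  simp only [PySem.Dict.keys_foldl_modify_key]
  rw [PySem.Set.ofList_eq_foldl]
  simp only [PySem.Set.update, PySem.Dict.keys_empty, List.map_map]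
  rfl

theorem pvGrp_keys_nodup (bl : List String) (dq : List (String × Int × Int)) :
    (pvGrp bl dq).keys.Nodup := by
  rw [pvGrp_keys]
  exact PySem.Set.nodup_ofList _

-- the reserved list as a flatMap over the (nodup) keys
theorem pvRes_eq_flatMap (bl : List String) (td : PySem.Dict String Int) (mpd : Int)
    (dq : List (String × Int × Int)) :
    pvRes bl td mpd dq
      = (pvGrp bl dq).keys.flatMap (fun k =>
          ((pvGrp bl dq).getD k []).take (max 0 (mpd - td.getD k 0)).toNat) := by
  unfold pvRes
  rw [PySem.Dict.items_eq_map_keys _ (pvGrp_keys_nodup bl dq) []]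
  rw [PySem.List.foldl_append_eq_flatMap, List.nil_append, List.flatMap_map]
  exact List.flatMap_congr (fun k _ => PySem.List.slice_to _ (le_max_left 0 _))

-- ===== counts =====

theorem pvCnt_cons (bl : List String) (k : String) (x : String × Int × Int)
    (L : List (String × Int × Int)) :
    pvCnt bl k (x :: L)
      = (if (pvElig bl x && (pvItemDomain x.1 == k)) = true then 1 else 0) + pvCnt bl k L := by
  unfold pvCnt
  rw [List.filter_cons]
  by_cases he : pvElig bl x
  · rw [if_pos he, List.filter_cons]
    by_cases hk : (pvItemDomain x.1 == k)
    · simp [he, hk, Nat.add_comm]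
    · simp [he, hk]
  · simp [he]

theorem length_filter_vis0 (bl : List String) (k : String) :
    ∀ (P : List (String × Int × Int)) (s : Int),
    ((pvVisF bl P s).filter (fun v => v.2.2 == 0 && (pvItemDomain v.2.1 == k))).length
      = pvCnt bl k P := by
  intro P
  induction P with
  | nil => intro s; simp [pvVisF, pvCnt]
  | cons x L ih =>
    intro s
    rw [pvVisF_cons, List.filter_append, List.length_append, ih (s + 1), pvCnt_cons]
    by_cases hb : x.1 ∈ bl
    · have he : pvElig bl x = false := by simp [pvElig, hb]
      simp [hb, he]
    · by_cases hr : x.2.1 = 0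
      · have he : pvElig bl x = true := by simp [pvElig, hb, hr]
        by_cases hk : (pvItemDomain x.1 == k)
        · simp [hb, he, hr, hk]
        · simp [hb, he, hr, hk]
      · have he : pvElig bl x = false := by simp [pvElig, hr]
        have hr' : (x.2.1 == 0) = false := by simp [hr]
        simp [hb, he, hr']

theorem pvSeen_getD (bl : List String) :
    ∀ (P : List (String × Int × Int)) (sd : PySem.Dict String Int) (d : String),
    (pvSeen bl P sd).getD d 0 = sd.getD d 0 + (pvCnt bl d P : Int) := by
  intro P
  induction P with
  | nil => intro sd d; simp [pvSeen, pvCnt]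
  | cons x L ih =>
    intro sd d
    rw [pvCnt_cons]
    by_cases he : pvElig bl x
    · simp only [pvSeen, he, if_true]
      rw [ih]
      by_cases hd : d = pvItemDomain x.1
      · subst hd
        rw [PySem.Dict.getD_insert_self]
        simp only [beq_self_eq_true, Bool.and_true, he, if_true]
        push_cast
        ring
      · rw [PySem.Dict.getD_insert_of_ne _ _ _ hd]
        have hne : ¬ pvItemDomain x.1 = d := fun h => hd h.symm
        simp [hne]
    · simp only [pvSeen, he, Bool.false_eq_true, if_false]
      rw [ih]
      have he' : (pvElig bl x && (pvItemDomain x.1 == d)) = false := by simp [he]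
      simp [he']

theorem pvNR_append_singleton (bl : List String) (R : List Int)
    (P : List (String × Int × Int)) (x : String × Int × Int) :
    pvNR bl R (P ++ [x]) 0
      = pvNR bl R P 0 + (if x.1 ∉ bl ∧ x.2.1 ≤ 0 ∧
          ¬ PySem.Set.contains (PySem.Set.ofList R) (P.length : Int) then 1 else 0) := by
  unfold pvNR
  rw [pvVisF_append, List.filter_append, List.length_append]
  congr 1
  rw [pvVisF_cons]
  by_cases hb : x.1 ∈ bl
  · simp [pvVisF, hb]
  · by_cases hr : x.2.1 ≤ 0
    · by_cases hc : PySem.Set.contains (PySem.Set.ofList R) ((0 : Int) + (P.length : Int))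
      · simp_all [pvVisF, List.filter_cons, hb]
      · simp_all [pvVisF, List.filter_cons, hb]
    · simp_all [pvVisF, List.filter_cons, hb]

-- ===== membership in a take around a split =====

theorem mem_take_middle {α : Type} [DecidableEq α] (a : α) (before after : List α) (m : Nat)
    (hb : a ∉ before) (ha : a ∉ after) :
    (a ∈ (before ++ a :: after).take m) ↔ before.length < m := by
  rw [List.take_append]
  constructor
  · intro h
    rcases List.mem_append.1 h with h | h
    · exact absurd (List.mem_of_mem_take h) hb
    · rcases Nat.eq_zero_or_pos (m - before.length) with h0 | h0
      · rw [h0] at h; simp at h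
      · omega
  · intro h
    refine List.mem_append.2 (Or.inr ?_)
    have : m - before.length = (m - before.length - 1) + 1 := by omega
    rw [this, List.take_succ_cons]
    simp

-- ===== membership in B's reserved / extras lists at a split point =====

theorem vis_split (bl : List String) (P L : List (String × Int × Int)) (x : String × Int × Int) :
    pvVisF bl (P ++ x :: L) 0
      = pvVisF bl P 0 ++ ((if x.1 ∈ bl then [] else [((P.length : Int), x.1, x.2.1)])
          ++ pvVisF bl L ((P.length : Int) + 1)) := by
  rw [pvVisF_append, pvVisF_cons]
  simp

theorem fst_ne_of_mem_before (bl : List String) (P : List (String × Int × Int))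
    (v : Int × String × Int) (hv : v ∈ pvVisF bl P 0) : v.1 ≠ (P.length : Int) := by
  have := pvVisF_fst_bounds bl P 0 v hv
  omega

theorem fst_ne_of_mem_after (bl : List String) (L : List (String × Int × Int)) (n : Int)
    (v : Int × String × Int) (hv : v ∈ pvVisF bl L (n + 1)) : v.1 ≠ n := by
  have := pvVisF_fst_bounds bl L (n + 1) v hv
  omega

-- the middle split of the group of x's domain
theorem pvGrp_getD_split (bl : List String) (P L : List (String × Int × Int))
    (x : String × Int × Int) (hb : x.1 ∉ bl) (hx0 : x.2.1 = 0) :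
    (pvGrp bl (P ++ x :: L)).getD (pvItemDomain x.1) []
      = ((pvVisF bl P 0).filter
            (fun v => v.2.2 == 0 && (pvItemDomain v.2.1 == pvItemDomain x.1))).map (fun v => v.1)
        ++ (P.length : Int)
        :: ((pvVisF bl L ((P.length : Int) + 1)).filter
            (fun v => v.2.2 == 0 && (pvItemDomain v.2.1 == pvItemDomain x.1))).map (fun v => v.1) := by
  rw [pvGrp_getD, vis_split, List.filter_append, List.filter_append, List.map_append,
    List.map_append, if_neg hb]
  simp [hx0]

-- no group contains the position of a non-new item
theorem not_mem_pvRes (bl : List String) (td : PySem.Dict String Int) (mpd : Int)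
    (P L : List (String × Int × Int)) (x : String × Int × Int) (hx0 : x.2.1 ≠ 0) :
    ((P.length : Int) ∉ pvRes bl td mpd (P ++ x :: L)) := by
  rw [pvRes_eq_flatMap]
  intro hmem
  rcases List.mem_flatMap.1 hmem with ⟨k, _, htk⟩
  have hGDk := pvGrp_getD bl (P ++ x :: L) k
  rw [vis_split, List.filter_append, List.filter_append, List.map_append, List.map_append] at hGDk
  have hmemGD := List.mem_of_mem_take htk
  rw [hGDk] at hmemGD
  rcases List.mem_append.1 hmemGD with h | h
  · rcases List.mem_map.1 h with ⟨v, hv, hveq⟩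
    exact fst_ne_of_mem_before bl P v (List.mem_filter.1 hv).1 hveq
  rcases List.mem_append.1 h with h | h
  · rcases List.mem_map.1 h with ⟨v, hv, hveq⟩
    have := (List.mem_filter.1 hv).2
    have hvmid : v = ((P.length : Int), x.1, x.2.1) := by
      split at hv
      · simp at hv
      · have := (List.mem_filter.1 hv).1
        simpa using this
    rw [hvmid] at this
    simp [hx0] at this
  · rcases List.mem_map.1 h with ⟨v, hv, hveq⟩
    exact fst_ne_of_mem_after bl L (P.length : Int) v (List.mem_filter.1 hv).1 hveq

theorem mem_pvRes_iff (bl : List String) (td : PySem.Dict String Int) (mpd : Int)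
    (P L : List (String × Int × Int)) (x : String × Int × Int)
    (hb : x.1 ∉ bl) (hx0 : x.2.1 = 0) :
    ((P.length : Int) ∈ pvRes bl td mpd (P ++ x :: L))
      ↔ ((pvCnt bl (pvItemDomain x.1) P : Int) < mpd - td.getD (pvItemDomain x.1) 0) := by
  have hsplit := pvGrp_getD_split bl P L x hb hx0
  have hmid : ((P.length : Int), x.1, x.2.1) ∈ pvVisF bl (P ++ x :: L) 0 := by
    rw [vis_split, if_neg hb]
    simp
  have htake : ∀ m : Nat,
      ((P.length : Int) ∈ ((pvGrp bl (P ++ x :: L)).getD (pvItemDomain x.1) []).take m)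
        ↔ pvCnt bl (pvItemDomain x.1) P < m := by
    intro m
    rw [hsplit, mem_take_middle _ _ _ m
      (fun h => by
        rcases List.mem_map.1 h with ⟨v, hv, hveq⟩
        exact fst_ne_of_mem_before bl P v (List.mem_filter.1 hv).1 hveq)
      (fun h => by
        rcases List.mem_map.1 h with ⟨v, hv, hveq⟩
        exact fst_ne_of_mem_after bl L (P.length : Int) v (List.mem_filter.1 hv).1 hveq)]
    rw [List.length_map, length_filter_vis0]
  rw [pvRes_eq_flatMap]
  constructor
  · intro hmem
    rcases List.mem_flatMap.1 hmem with ⟨k, _, htk⟩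
    have hkd : k = pvItemDomain x.1 := by
      have hGDk := pvGrp_getD bl (P ++ x :: L) k
      rw [vis_split, List.filter_append, List.filter_append, List.map_append,
        List.map_append, if_neg hb] at hGDk
      have hmemGD := List.mem_of_mem_take htk
      rw [hGDk] at hmemGD
      rcases List.mem_append.1 hmemGD with h | h
      · rcases List.mem_map.1 h with ⟨v, hv, hveq⟩
        exact absurd hveq (fst_ne_of_mem_before bl P v (List.mem_filter.1 hv).1)
      rcases List.mem_append.1 h with h | h
      · rcases List.mem_map.1 h with ⟨v, hv, hveq⟩
        have hp := (List.mem_filter.1 hv).2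
        have hvmid : v = ((P.length : Int), x.1, x.2.1) := by
          have := (List.mem_filter.1 hv).1
          simpa using this
        rw [hvmid] at hp
        have hdk : pvItemDomain x.1 = k := by simpa using (Bool.and_elim_right hp)
        exact hdk.symm
      · rcases List.mem_map.1 h with ⟨v, hv, hveq⟩
        exact absurd hveq (fst_ne_of_mem_after bl L (P.length : Int) v (List.mem_filter.1 hv).1)
    rw [hkd] at htk
    have := (htake _).1 htk
    have hnn : (0 : Int) ≤ (pvCnt bl (pvItemDomain x.1) P : Int) := Int.natCast_nonneg _
    omega
  · intro hlt
    refine List.mem_flatMap.2 ⟨pvItemDomain x.1, ?_, ?_⟩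
    · rw [pvGrp_keys, PySem.Set.mem_ofList]
      refine List.mem_map.2 ⟨((P.length : Int), x.1, x.2.1), ?_, rfl⟩
      refine List.mem_filter.2 ⟨hmid, by simp [hx0]⟩
    · refine (htake _).2 ?_
      omega

theorem mem_pvExtras_iff (bl : List String) (td : PySem.Dict String Int) (mpd budget : Int)
    (P L : List (String × Int × Int)) (x : String × Int × Int)
    (hb : x.1 ∉ bl) (hr : x.2.1 ≤ 0) (hbud : 0 ≤ budget)
    (hnr : (P.length : Int) ∉ pvRes bl td mpd (P ++ x :: L)) :
    ((P.length : Int) ∈ pvExtras bl td mpd budget (P ++ x :: L))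
      ↔ ((pvNR bl (pvRes bl td mpd (P ++ x :: L)) P 0 : Int) < budget) := by
  have hq : (decide (x.2.1 ≤ 0) &&
      !PySem.Set.contains (PySem.Set.ofList (pvRes bl td mpd (P ++ x :: L))) (P.length : Int))
        = true := by
    have hc : PySem.Set.contains (PySem.Set.ofList (pvRes bl td mpd (P ++ x :: L)))
        (P.length : Int) = false := by
      rw [Bool.eq_false_iff]
      intro hcc
      exact hnr ((PySem.Set.mem_ofList _ _).1 ((PySem.Set.contains_iff _ _).1 hcc))
    rw [hc]
    simp [hr]
  unfold pvExtras
  rw [PySem.List.slice_to _ hbud, vis_split, List.filter_append, List.filter_append,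
    List.map_append, List.map_append, if_neg hb]
  have hmidf : (List.filter (fun v => decide (v.2.2 ≤ 0) &&
      !PySem.Set.contains (PySem.Set.ofList (pvRes bl td mpd (P ++ x :: L))) v.1)
      [((P.length : Int), x.1, x.2.1)]) = [((P.length : Int), x.1, x.2.1)] := by
    rw [List.filter_cons, if_pos hq]
    rfl
  rw [hmidf]
  simp only [List.map_cons, List.map_nil, List.singleton_append]
  rw [mem_take_middle _ _ _ budget.toNat
    (fun h => by
      rcases List.mem_map.1 h with ⟨v, hv, hveq⟩
      exact fst_ne_of_mem_before bl P v (List.mem_filter.1 hv).1 hveq)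
    (fun h => by
      rcases List.mem_map.1 h with ⟨v, hv, hveq⟩
      exact fst_ne_of_mem_after bl L (P.length : Int) v (List.mem_filter.1 hv).1 hveq)]
  rw [List.length_map]
  unfold pvNR
  omega

-- ===== A-side: membership in the pvSel selection at a split point =====

theorem pvSel_mem_sub (bl : List String) (tg : String → Int) (m : List (String × Int × Int))
    (sd0 : PySem.Dict String Int) (y : String) (hy : y ∈ pvSel bl tg m sd0) :
    y ∈ (m.filter (fun it => !decide (it.1 ∈ bl) && decide (it.2.1 ≤ 0))).map (fun it => it.1) := by
  rcases List.mem_map.1 ((pvSel_sublist bl tg m sd0).subset hy) with ⟨it, hit, rfl⟩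
  have hf := List.mem_filter.1 hit
  refine List.mem_map.2 ⟨it, List.mem_filter.2 ⟨hf.1, ?_⟩, rfl⟩
  have := hf.2
  simp only [pvElig, Bool.and_eq_true, Bool.not_eq_true', decide_eq_false_iff_not,
    decide_eq_true_eq] at this ⊢
  exact ⟨this.1, by omega⟩

theorem mem_pvSel_iff (bl : List String) (td : PySem.Dict String Int) (mpd : Int)
    (P L : List (String × Int × Int)) (x : String × Int × Int)
    (hnd : (((P ++ x :: L).filter (fun it => !decide (it.1 ∈ bl) && decide (it.2.1 ≤ 0))).map
      (fun it => it.1)).Nodup)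
    (hb : x.1 ∉ bl) (hr : x.2.1 = 0) :
    (x.1 ∈ pvSel bl (fun d => mpd - td.getD d 0) (P ++ x :: L) PySem.Dict.empty)
      ↔ (pvSeen bl P PySem.Dict.empty).getD (pvItemDomain x.1) 0
          < mpd - td.getD (pvItemDomain x.1) 0 := by
  have hq : (fun it : String × Int × Int =>
      !decide (it.1 ∈ bl) && decide (it.2.1 ≤ 0)) x = true := by
    simp only [Bool.and_eq_true, Bool.not_eq_true', decide_eq_false_iff_not, decide_eq_true_eq]
    exact ⟨hb, by omega⟩
  have hnd' : ((P.filter (fun it => !decide (it.1 ∈ bl) && decide (it.2.1 ≤ 0))).map (fun it => it.1)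
      ++ x.1 :: (L.filter (fun it => !decide (it.1 ∈ bl) && decide (it.2.1 ≤ 0))).map
        (fun it => it.1)).Nodup := by
    have : (P ++ x :: L).filter (fun it => !decide (it.1 ∈ bl) && decide (it.2.1 ≤ 0))
        = P.filter (fun it => !decide (it.1 ∈ bl) && decide (it.2.1 ≤ 0))
          ++ x :: L.filter (fun it => !decide (it.1 ∈ bl) && decide (it.2.1 ≤ 0)) := by
      rw [List.filter_append, List.filter_cons, if_pos hq]
    rw [this, List.map_append, List.map_cons] at hnd
    exact hnd
  have hxp : x.1 ∉ (P.filter (fun it => !decide (it.1 ∈ bl) && decide (it.2.1 ≤ 0))).map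
      (fun it => it.1) := by
    intro hmem
    exact ((List.nodup_append.1 hnd').2.2 x.1 hmem x.1 List.mem_cons_self) rfl
  have hxl : x.1 ∉ (L.filter (fun it => !decide (it.1 ∈ bl) && decide (it.2.1 ≤ 0))).map
      (fun it => it.1) :=
    (List.nodup_cons.1 (List.nodup_append.1 hnd').2.1).1
  rw [pvSel_append bl (fun d => mpd - td.getD d 0) P (x :: L) PySem.Dict.empty, List.mem_append]
  constructor
  · rintro (h | h)
    · exact absurd (pvSel_mem_sub bl _ _ _ _ h) hxp
    · simp only [pvSel, if_neg hb, if_pos hr] at h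
      split at h
      · rcases List.mem_cons.1 h with h' | h'
        · assumption
        · exact absurd (pvSel_mem_sub bl _ _ _ _ h') hxl
      · exact absurd (pvSel_mem_sub bl _ _ _ _ h) hxl
  · intro h
    refine Or.inr ?_
    simp only [pvSel, if_neg hb, if_pos hr]
    rw [if_pos h]
    simp

theorem not_mem_pvSel (bl : List String) (td : PySem.Dict String Int) (mpd : Int)
    (P L : List (String × Int × Int)) (x : String × Int × Int)
    (hnd : (((P ++ x :: L).filter (fun it => !decide (it.1 ∈ bl) && decide (it.2.1 ≤ 0))).map
      (fun it => it.1)).Nodup)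
    (hb : x.1 ∉ bl) (hr : x.2.1 ≤ 0) (hr0 : x.2.1 ≠ 0) :
    x.1 ∉ pvSel bl (fun d => mpd - td.getD d 0) (P ++ x :: L) PySem.Dict.empty := by
  have hq : (fun it : String × Int × Int =>
      !decide (it.1 ∈ bl) && decide (it.2.1 ≤ 0)) x = true := by
    simp only [Bool.and_eq_true, Bool.not_eq_true', decide_eq_false_iff_not, decide_eq_true_eq]
    exact ⟨hb, hr⟩
  have hnd' : ((P.filter (fun it => !decide (it.1 ∈ bl) && decide (it.2.1 ≤ 0))).map (fun it => it.1)
      ++ x.1 :: (L.filter (fun it => !decide (it.1 ∈ bl) && decide (it.2.1 ≤ 0))).map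
        (fun it => it.1)).Nodup := by
    have : (P ++ x :: L).filter (fun it => !decide (it.1 ∈ bl) && decide (it.2.1 ≤ 0))
        = P.filter (fun it => !decide (it.1 ∈ bl) && decide (it.2.1 ≤ 0))
          ++ x :: L.filter (fun it => !decide (it.1 ∈ bl) && decide (it.2.1 ≤ 0)) := by
      rw [List.filter_append, List.filter_cons, if_pos hq]
    rw [this, List.map_append, List.map_cons] at hnd
    exact hnd
  have hxp : x.1 ∉ (P.filter (fun it => !decide (it.1 ∈ bl) && decide (it.2.1 ≤ 0))).map
      (fun it => it.1) := by
    intro hmem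
    exact ((List.nodup_append.1 hnd').2.2 x.1 hmem x.1 List.mem_cons_self) rfl
  have hxl : x.1 ∉ (L.filter (fun it => !decide (it.1 ∈ bl) && decide (it.2.1 ≤ 0))).map
      (fun it => it.1) :=
    (List.nodup_cons.1 (List.nodup_append.1 hnd').2.1).1
  intro hmemS
  rw [pvSel_append bl (fun d => mpd - td.getD d 0) P (x :: L) PySem.Dict.empty,
    List.mem_append] at hmemS
  rcases hmemS with h | h
  · exact absurd (pvSel_mem_sub bl _ _ _ _ h) hxp
  · simp only [pvSel, if_neg hb, if_neg hr0] at h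
    exact absurd (pvSel_mem_sub bl _ _ _ _ h) hxl

-- ===== pass 2: A's fold equals B's index-membership filter =====

theorem pass2 (bl : List String) (td : PySem.Dict String Int) (mpd budget : Int)
    (dq : List (String × Int × Int))
    (hnd : ((dq.filter (fun it => !decide (it.1 ∈ bl) && decide (it.2.1 ≤ 0))).map
      (fun it => it.1)).Nodup)
    (hbud : 0 ≤ budget)
    (S : PySem.Set String)
    (hS : S = PySem.Set.ofList (pvSel bl (fun d => mpd - td.getD d 0) dq PySem.Dict.empty))
    (chosen : PySem.Set Int)
    (hch : chosen = PySem.Set.union (PySem.Set.ofList (pvRes bl td mpd dq))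
      (PySem.Set.ofList (pvExtras bl td mpd budget dq))) :
    ∀ (L P : List (String × Int × Int)) (nra : Int) (acc : List String),
    dq = P ++ L → nra = min budget ((pvNR bl (pvRes bl td mpd dq) P 0 : Int)) →
    (L.foldl (pvA2step bl S budget) (nra, acc)).2
      = acc ++ ((pvVisF bl L (P.length : Int)).filter
          (fun v => decide (v.2.2 > 0) || PySem.Set.contains chosen v.1)).map (fun v => v.2.1) := by
  intro L
  induction L with
  | nil => intro P nra acc _ _; simp [pvVisF]
  | cons x L ih =>
    intro P nra acc hdq hnra
    have hlen1 : ((P ++ [x]).length : Int) = (P.length : Int) + 1 := by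
      simp
    have hdq' : dq = (P ++ [x]) ++ L := by rw [hdq, List.append_assoc]; rfl
    rw [pvVisF_cons, List.filter_append, List.map_append, List.foldl_cons]
    by_cases hb : x.1 ∈ bl
    · have hstep : pvA2step bl S budget (nra, acc) x = (nra, acc) := by simp [pvA2step, hb]
      have hNR : pvNR bl (pvRes bl td mpd dq) (P ++ [x]) 0
          = pvNR bl (pvRes bl td mpd dq) P 0 := by
        rw [pvNR_append_singleton, if_neg (fun hcond => hcond.1 hb)]
        omega
      rw [hstep, ih (P ++ [x]) nra acc hdq' (by rw [hNR]; exact hnra), hlen1]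
      simp [hb]
    · by_cases hpos : x.2.1 > 0
      · have hstep : pvA2step bl S budget (nra, acc) x = (nra, acc ++ [x.1]) := by
          simp [pvA2step, hb, hpos]
        have hNR : pvNR bl (pvRes bl td mpd dq) (P ++ [x]) 0
            = pvNR bl (pvRes bl td mpd dq) P 0 := by
          rw [pvNR_append_singleton, if_neg (fun hcond => absurd hcond.2.1 (by omega))]
          omega
        rw [hstep, ih (P ++ [x]) nra (acc ++ [x.1]) hdq' (by rw [hNR]; exact hnra), hlen1]
        simp [hb, hpos]
      · have hr : x.2.1 ≤ 0 := by omega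
        have hnd' := hnd
        rw [hdq] at hnd'
        -- A reserves x's id exactly when B reserves x's queue position
        have hResIff : ((P.length : Int) ∈ pvRes bl td mpd dq)
            ↔ (PySem.Set.contains S x.1 = true) := by
          rw [hS, PySem.Set.contains_iff, PySem.Set.mem_ofList, hdq]
          by_cases hr0 : x.2.1 = 0
          · rw [mem_pvRes_iff bl td mpd P L x hb hr0,
              mem_pvSel_iff bl td mpd P L x hnd' hb hr0, pvSeen_getD]
            simp
          · have h1 := not_mem_pvRes bl td mpd P L x hr0
            have h2 := not_mem_pvSel bl td mpd P L x hnd' hb hr hr0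
            simp [h1, h2]
        by_cases hres : (P.length : Int) ∈ pvRes bl td mpd dq
        · -- reserved slot: both append, counters unchanged
          have hcs : PySem.Set.contains S x.1 = true := hResIff.1 hres
          have hstep : pvA2step bl S budget (nra, acc) x = (nra, acc ++ [x.1]) := by
            simp only [pvA2step, if_neg hb, if_neg hpos]
            rw [if_pos hcs]
          have hNR : pvNR bl (pvRes bl td mpd dq) (P ++ [x]) 0
              = pvNR bl (pvRes bl td mpd dq) P 0 := by
            rw [pvNR_append_singleton, if_neg (fun hcond => hcond.2.2
              ((PySem.Set.contains_iff _ _).2 ((PySem.Set.mem_ofList _ _).2 hres)))]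
            omega
          have hchosenm : (P.length : Int) ∈ chosen := by
            rw [hch]
            exact (PySem.Set.mem_union _ _ _).2 (Or.inl ((PySem.Set.mem_ofList _ _).2 hres))
          rw [hstep, ih (P ++ [x]) nra (acc ++ [x.1]) hdq' (by rw [hNR]; exact hnra), hlen1]
          simp [hb, hchosenm]
        · -- non-reserved: both consume (or exhaust) the shared budget
          have hcs : PySem.Set.contains S x.1 = false := by
            rw [Bool.eq_false_iff]
            intro hcc
            exact hres (hResIff.2 hcc)
          have hresSplit : (P.length : Int) ∉ pvRes bl td mpd (P ++ x :: L) := by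
            rw [← hdq]; exact hres
          have hNR : pvNR bl (pvRes bl td mpd dq) (P ++ [x]) 0
              = pvNR bl (pvRes bl td mpd dq) P 0 + 1 := by
            rw [pvNR_append_singleton, if_pos ⟨hb, hr, fun hcc => hres
              ((PySem.Set.mem_ofList _ _).1 ((PySem.Set.contains_iff _ _).1 hcc))⟩]
          have hext : ((P.length : Int) ∈ pvExtras bl td mpd budget dq)
              ↔ ((pvNR bl (pvRes bl td mpd dq) P 0 : Int) < budget) := by
            rw [hdq]
            exact mem_pvExtras_iff bl td mpd budget P L x hb hr hbud hresSplit
          by_cases hnb : nra < budget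
          · have hltNR : (pvNR bl (pvRes bl td mpd dq) P 0 : Int) < budget := by omega
            have hstep : pvA2step bl S budget (nra, acc) x = (nra + 1, acc ++ [x.1]) := by
              simp only [pvA2step, if_neg hb, if_neg hpos]
              rw [hcs]
              simp only [Bool.false_eq_true, if_false]
              rw [if_pos hnb]
            have hchosenm : (P.length : Int) ∈ chosen := by
              rw [hch]
              exact (PySem.Set.mem_union _ _ _).2
                (Or.inr ((PySem.Set.mem_ofList _ _).2 (hext.2 hltNR)))
            rw [hstep, ih (P ++ [x]) (nra + 1) (acc ++ [x.1]) hdq'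
              (by rw [hNR]; push_cast; omega), hlen1]
            simp [hb, hchosenm]
          · have hgeNR : ¬ (pvNR bl (pvRes bl td mpd dq) P 0 : Int) < budget := by omega
            have hstep : pvA2step bl S budget (nra, acc) x = (nra, acc) := by
              simp only [pvA2step, if_neg hb, if_neg hpos]
              rw [hcs]
              simp only [Bool.false_eq_true, if_false]
              rw [if_neg hnb]
            have hchosenm : (P.length : Int) ∉ chosen := by
              rw [hch]
              intro hcc
              rcases (PySem.Set.mem_union _ _ _).1 hcc with h | h
              · exact hres ((PySem.Set.mem_ofList _ _).1 h)
              · exact hgeNR (hext.1 ((PySem.Set.mem_ofList _ _).1 h))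
            rw [hstep, ih (P ++ [x]) nra acc hdq' (by rw [hNR]; push_cast; omega), hlen1]
            simp [hb, hpos, hchosenm]

-- ===== the two reservation totals agree =====

theorem vis_domains (bl : List String) :
    ∀ (dq : List (String × Int × Int)) (s : Int),
    ((pvVisF bl dq s).filter (fun v => v.2.2 == 0)).map (fun v => pvItemDomain v.2.1)
      = (dq.filter (pvElig bl)).map (fun it => pvItemDomain it.1) := by
  intro dq
  induction dq with
  | nil => intro s; simp [pvVisF]
  | cons x L ih =>
    intro s
    rw [pvVisF_cons, List.filter_append, List.map_append, ih (s + 1), List.filter_cons]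
    by_cases hb : x.1 ∈ bl
    · have he : pvElig bl x = false := by simp [pvElig, hb]
      simp [hb, he]
    · by_cases hr : x.2.1 = 0
      · have he : pvElig bl x = true := by simp [pvElig, hb, hr]
        simp [hb, he, hr]
      · have he : pvElig bl x = false := by simp [pvElig, hr]
        have hr' : (x.2.1 == 0) = false := by simp [hr]
        simp [hb, he, hr']

theorem count_dom_eq_pvCnt (bl : List String) (dq : List (String × Int × Int)) (d : String) :
    ((dq.filter (pvElig bl)).map (fun it => pvItemDomain it.1)).count d = pvCnt bl d dq := by
  rw [List.count_eq_countP, List.countP_map, pvCnt, List.countP_eq_length_filter]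
  rfl

theorem reserved_len_eq (bl : List String) (td : PySem.Dict String Int) (mpd : Int)
    (dq : List (String × Int × Int))
    (hnd : ((dq.filter (fun it => !decide (it.1 ∈ bl) && decide (it.2.1 ≤ 0))).map
      (fun it => it.1)).Nodup) :
    PySem.Set.len ((dq.foldl (pvA1step bl td mpd) (PySem.Set.empty, PySem.Dict.empty)).1)
      = ((pvRes bl td mpd dq).length : Int) := by
  have hemp : ∀ d : String, (PySem.Dict.empty : PySem.Dict String Int).getD d 0 = 0 := by
    intro d; simp [pysem]
  have hS := pass1_eq_pvSel bl td mpd dq PySem.Set.empty PySem.Dict.empty PySem.Dict.empty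
    (fun d => by rw [hemp d]) (fun d => by rw [hemp d]; omega)
  have hsub := pvSel_sublist bl (fun d => mpd - td.getD d 0) dq PySem.Dict.empty
  have hsub2 : List.Sublist ((dq.filter (pvElig bl)).map (fun it => it.1))
      ((dq.filter (fun it => !decide (it.1 ∈ bl) && decide (it.2.1 ≤ 0))).map (fun it => it.1)) := by
    refine List.Sublist.map _ (List.monotone_filter_right dq ?_)
    intro a ha
    simp only [pvElig, Bool.and_eq_true, Bool.not_eq_true', decide_eq_false_iff_not,
      decide_eq_true_eq] at ha ⊢
    exact ⟨ha.1, by omega⟩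
  have hndsel : (pvSel bl (fun d => mpd - td.getD d 0) dq PySem.Dict.empty).Nodup :=
    hnd.sublist (hsub.trans hsub2)
  have hofl : (pvSel bl (fun d => mpd - td.getD d 0) dq PySem.Dict.empty).foldl
        PySem.Set.add PySem.Set.empty
      = pvSel bl (fun d => mpd - td.getD d 0) dq PySem.Dict.empty := by
    rw [show (PySem.Set.empty : PySem.Set String) = [] from rfl, ← PySem.Set.ofList_eq_foldl]
    exact nodup_ofList_eq_self _ hndsel
  rw [hS, hofl]
  have hlenS : PySem.Set.len (pvSel bl (fun d => mpd - td.getD d 0) dq PySem.Dict.empty)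
      = ((pvSel bl (fun d => mpd - td.getD d 0) dq PySem.Dict.empty).length : Int) := by
    simp [PySem.Set.len]
  rw [hlenS]
  have hkey : ∀ y ∈ pvSel bl (fun d => mpd - td.getD d 0) dq PySem.Dict.empty,
      pvItemDomain y ∈ PySem.Set.ofList ((dq.filter (pvElig bl)).map (fun it => pvItemDomain it.1)) := by
    intro y hy
    rw [PySem.Set.mem_ofList]
    rcases List.mem_map.1 (hsub.subset hy) with ⟨it, hit, rfl⟩
    exact List.mem_map.2 ⟨it, hit, rfl⟩
  rw [length_eq_sum_countP pvItemDomain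
    (PySem.Set.ofList ((dq.filter (pvElig bl)).map (fun it => pvItemDomain it.1)))
    (pvSel bl (fun d => mpd - td.getD d 0) dq PySem.Dict.empty)
    (PySem.Set.nodup_ofList _) hkey]
  have hB : ((pvRes bl td mpd dq).length : Int)
      = ((PySem.Set.ofList ((dq.filter (pvElig bl)).map (fun it => pvItemDomain it.1))).map
          (fun d => ((min (max 0 (mpd - td.getD d 0)).toNat (pvCnt bl d dq) : Nat) : Int))).sum := by
    rw [pvRes_eq_flatMap, List.length_flatMap, Nat.cast_list_sum, List.map_map]
    rw [pvGrp_keys, vis_domains]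
    refine congrArg List.sum (List.map_congr_left (fun d hd => ?_))
    simp only [Function.comp_apply]
    rw [List.length_take, pvGrp_getD, List.length_map, length_filter_vis0]
  rw [hB]
  refine congrArg List.sum (List.map_congr_left (fun d hd => ?_))
  have hc := countP_pvSel bl td mpd dq PySem.Dict.empty d (fun d' => by rw [hemp d'])
  rw [hemp d] at hc
  rw [hc, ← count_dom_eq_pvCnt bl dq d]
  push_cast
  omega

theorem hslice_cap (r : List String) (m : Int) :
    (if (r.length : Int) > m then PySem.List.slice r none (some m) else r)
      = PySem.List.slice r none (some m) := by
  split_ifs with h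
  · rfl
  · have hm : 0 ≤ m := le_trans (Int.natCast_nonneg r.length) (by omega)
    rw [PySem.List.slice_to r hm, List.take_of_length_le (by omega)]

theorem apply_throttle_and_cap_spec : Claim_equal_apply_throttle_and_cap := by
  intro dq tdl tnm mpd mr bl _hD hPre
  have hnd : ((dq.filter (fun it => !decide (it.1 ∈ bl) && decide (it.2.1 ≤ 0))).map
      (fun it => it.1)).Nodup := hPre
  show apply_throttle_and_cap dq tdl tnm mpd mr bl
      = apply_throttle_and_cap_alt dq tdl tnm mpd mr bl
  have hemp : ∀ d : String, (PySem.Dict.empty : PySem.Dict String Int).getD d 0 = 0 := by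
    intro d; simp [pysem]
  have hsum : (PySem.Dict.values (PySem.Dict.mk tdl)).foldl (fun acc v => acc + v) 0
      = (PySem.Dict.values (PySem.Dict.mk tdl)).sum := by
    rw [PySem.List.foldl_add _ (fun v => v)]
    rw [zero_add, List.map_id']
  have hS1 : (dq.foldl (pvA1step bl (PySem.Dict.mk tdl) mpd)
        (PySem.Set.empty, PySem.Dict.empty)).1
      = PySem.Set.ofList (pvSel bl (fun d => mpd - (PySem.Dict.mk tdl).getD d 0) dq
          PySem.Dict.empty) := by
    rw [pass1_eq_pvSel bl (PySem.Dict.mk tdl) mpd dq PySem.Set.empty PySem.Dict.empty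
      PySem.Dict.empty (fun d => by rw [hemp d]) (fun d => by rw [hemp d]; omega)]
    rw [PySem.Set.ofList_eq_foldl]
    rfl
  have hlen := reserved_len_eq bl (PySem.Dict.mk tdl) mpd dq hnd
  have hbud0 : (0 : Int) ≤ max 0 (tnm - ((pvRes bl (PySem.Dict.mk tdl) mpd dq).length : Int)
      - (PySem.Dict.values (PySem.Dict.mk tdl)).sum) := le_max_left _ _
  have hBeq : apply_throttle_and_cap_alt dq tdl tnm mpd mr bl
      = PySem.List.slice (((pvVisF bl dq 0).filter (fun v => decide (v.2.2 > 0) ||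
          PySem.Set.contains (PySem.Set.union
            (PySem.Set.ofList (pvRes bl (PySem.Dict.mk tdl) mpd dq))
            (PySem.Set.ofList (pvExtras bl (PySem.Dict.mk tdl) mpd
              (max 0 (tnm - ((pvRes bl (PySem.Dict.mk tdl) mpd dq).length : Int)
                - (PySem.Dict.values (PySem.Dict.mk tdl)).sum)) dq))) v.1)).map
          (fun v => v.2.1)) none (some mr) := rfl
  have hAeq : apply_throttle_and_cap dq tdl tnm mpd mr bl
      = (if (((dq.foldl (pvA2step bl
            ((dq.foldl (pvA1step bl (PySem.Dict.mk tdl) mpd)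
              (PySem.Set.empty, PySem.Dict.empty)).1)
            (max 0 (tnm - PySem.Set.len ((dq.foldl (pvA1step bl (PySem.Dict.mk tdl) mpd)
              (PySem.Set.empty, PySem.Dict.empty)).1)
              - (PySem.Dict.values (PySem.Dict.mk tdl)).foldl (fun acc v => acc + v) 0)))
            (0, [])).2.length : Int) > mr)
        then PySem.List.slice ((dq.foldl (pvA2step bl
            ((dq.foldl (pvA1step bl (PySem.Dict.mk tdl) mpd)
              (PySem.Set.empty, PySem.Dict.empty)).1)
            (max 0 (tnm - PySem.Set.len ((dq.foldl (pvA1step bl (PySem.Dict.mk tdl) mpd)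
              (PySem.Set.empty, PySem.Dict.empty)).1)
              - (PySem.Dict.values (PySem.Dict.mk tdl)).foldl (fun acc v => acc + v) 0)))
            (0, [])).2) none (some mr)
        else (dq.foldl (pvA2step bl
            ((dq.foldl (pvA1step bl (PySem.Dict.mk tdl) mpd)
              (PySem.Set.empty, PySem.Dict.empty)).1)
            (max 0 (tnm - PySem.Set.len ((dq.foldl (pvA1step bl (PySem.Dict.mk tdl) mpd)
              (PySem.Set.empty, PySem.Dict.empty)).1)
              - (PySem.Dict.values (PySem.Dict.mk tdl)).foldl (fun acc v => acc + v) 0)))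
            (0, [])).2) := rfl
  rw [hAeq, hBeq, hsum, hlen]
  rw [pass2 bl (PySem.Dict.mk tdl) mpd
    (max 0 (tnm - ((pvRes bl (PySem.Dict.mk tdl) mpd dq).length : Int)
      - (PySem.Dict.values (PySem.Dict.mk tdl)).sum)) dq hnd hbud0 _ hS1 _ rfl dq [] 0 []
    (by simp)
    (by
      have h0 : pvNR bl (pvRes bl (PySem.Dict.mk tdl) mpd dq) [] 0 = 0 := by
        simp [pvNR, pvVisF, PySem.List.enumerate_nil]
      rw [h0]
      omega)]
  simp only [List.nil_append, List.length_nil, Nat.cast_zero]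
  rw [hslice_cap]
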